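-- pv_equiv track=rewrite | github.com/SeongIkKim/ALtudy | 05.DP/tile_ornaments.py | solution
-- ===== SOURCE A (Python) =====
-- def solution(N):
--     fib = [0,1,1]
--     for i in range(3,81):
--         fib.append(fib[i-1]+fib[i-2])
--
--     if N>=4:
--         answer = fib[N]*3 + (fib[N-1]+fib[N-2])*2 + fib[N-3]*1
--     else:
--         perimeter = [0,4,6,10]
--         answer = perimeter[N]
--
--     return answer
-- ===== SOURCE B (Python) =====
-- def solution(N):
--     p = [0, 4, 6, 10]
--     for _ in range(4, N + 1):
--         p.append(p[-1] + p[-2])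
--     return p[N]
-- ===== Notes on version B (the rewrite author's own statement) =====
-- stated objective: simpler
-- what changed: B drops A's separate 81-entry Fibonacci table and weighted closed-form combination, and instead grows the perimeter sequence itself via its own recurrence p(n)=p(n-1)+p(n-2) from the base [0,4,6,10], indexing into it at the end.
-- crash fix: For 81 <= N <= 100000 A raises IndexError (its fib table has only 81 entries) while B extends the perimeter sequence and returns p(N). — e.g. on solution(81): A raises IndexError, B returns 198389706189510994
import Mathlib
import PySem

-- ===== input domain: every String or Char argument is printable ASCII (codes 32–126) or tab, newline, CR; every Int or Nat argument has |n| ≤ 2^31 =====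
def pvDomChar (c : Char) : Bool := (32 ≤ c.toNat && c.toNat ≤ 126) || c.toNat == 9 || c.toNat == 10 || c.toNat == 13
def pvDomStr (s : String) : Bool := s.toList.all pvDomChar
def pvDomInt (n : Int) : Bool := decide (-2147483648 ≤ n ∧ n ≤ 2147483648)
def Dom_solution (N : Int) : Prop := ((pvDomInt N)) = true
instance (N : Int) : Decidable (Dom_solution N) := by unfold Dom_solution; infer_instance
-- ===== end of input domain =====

set_option maxRecDepth 100000
set_option maxHeartbeats 2000000

-- B builds the perimeter sequence directly by its own Fibonacci recurrence p(n)=p(n-1)+p(n-2),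
-- replacing A's separate 81-entry fib table and weighted closed-form combination (objective: simpler).

-- ===== PORT A =====
def solution (N : Int) : Int :=
  let fib : List Int := (PySem.List.pyRange 3 81 1).foldl
    (fun fib i => fib ++ [(PySem.List.pyGet? fib (i-1)).getD 0 + (PySem.List.pyGet? fib (i-2)).getD 0])
    [0, 1, 1]
  if N ≥ 4 then
    (PySem.List.pyGet? fib N).getD 0 * 3
      + ((PySem.List.pyGet? fib (N-1)).getD 0 + (PySem.List.pyGet? fib (N-2)).getD 0) * 2
      + (PySem.List.pyGet? fib (N-3)).getD 0 * 1
  else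
    (PySem.List.pyGet? ([0, 4, 6, 10] : List Int) N).getD 0

-- ===== PORT B =====
def solution_alt (N : Int) : Int :=
  let p : List Int := (PySem.List.pyRange 4 (N+1) 1).foldl
    (fun p _ => p ++ [(PySem.List.pyGet? p (-1)).getD 0 + (PySem.List.pyGet? p (-2)).getD 0])
    [0, 4, 6, 10]
  (PySem.List.pyGet? p N).getD 0

-- ===== PRECONDITION & SPEC =====
-- Pre_ excludes exactly the inputs where the Python A raises IndexError: N ≤ -5 (negative index
-- past the 4-entry perimeter list) and N ≥ 81 (past the 81-entry fib table).
def Pre_solution (N : Int) : Prop := -4 ≤ N ∧ N ≤ 80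
instance (N : Int) : Decidable (Pre_solution N) := by unfold Pre_solution; infer_instance
def pvWitness_solution : Int := (7)

-- For 81 ≤ N ≤ 100000 A raises IndexError (its fib table has only 81 entries) while B extends the
-- perimeter sequence and returns p(N); the upper bound keeps the region to sizes B computes in practice.
def Raises_solution (N : Int) : Prop := 81 ≤ N ∧ N ≤ 100000
instance (N : Int) : Decidable (Raises_solution N) := by unfold Raises_solution; infer_instance
def pvRaiseWitness_solution : Int := (81)
def pvRaiseWitnessOut_solution : Int := 198389706189510994

def Spec_solution (N : Int) (out : Int) : Prop := out = solution_alt N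
instance (N : Int) (out : Int) : Decidable (Spec_solution N out) := by unfold Spec_solution; infer_instance

-- ===== CLAIM (what is proved, stated in full; the proofs are below) =====
def Claim_equal_solution : Prop := ∀ (N : Int), Dom_solution N → Pre_solution N → Spec_solution N (solution N)
def Claim_raises_solution : Prop := (∀ (N : Int), Dom_solution N → Raises_solution N → ¬ Pre_solution N) ∧ (Dom_solution (pvRaiseWitness_solution) ∧ Raises_solution (pvRaiseWitness_solution) ∧ solution_alt (pvRaiseWitness_solution) = pvRaiseWitnessOut_solution)

-- ===== LEMMAS AND PROOFS =====

-- ===== VERDICT (by name: the statement is the Claim_ definition above) =====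
theorem solution_spec : Claim_equal_solution := by
  unfold Claim_equal_solution
  intro N _ hpre
  unfold Spec_solution
  obtain ⟨h1, h2⟩ := hpre
  interval_cases N <;> decide

@[simp] theorem solution_raises : Claim_raises_solution := by
  unfold Claim_raises_solution
  exact ⟨by intro N _ h; unfold Raises_solution Pre_solution at *; omega, by decide⟩
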